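-- pv_equiv track=rewrite | github.com/AndreFragas/8QueensProblem | 8Queens/Utils.py | getNumberOfConflitsInCollumn
-- ===== SOURCE A (Python) =====
-- def getNumberOfConflitsInCollumn(table, row, collumn):
--     conflits = 0
--     for linha in range(len(table)):
--         for coluna in range(len(table[linha])):
--             if (coluna == collumn):
--                 if (table[linha][coluna] == 1 and linha != row):
--                     conflits += 1
--
--     return conflits
-- ===== SOURCE B (Python) =====
-- def getNumberOfConflitsInCollumn(table, row, collumn):
--     total = 0
--     for r in table:
--         if 0 <= collumn < len(r) and r[collumn] == 1:
--             total += 1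
--     if 0 <= row < len(table) and 0 <= collumn < len(table[row]) and table[row][collumn] == 1:
--         total -= 1
--     return total
-- ===== Notes on version B (the rewrite author's own statement) =====
-- stated objective: faster
-- what changed: Replaces the nested scan over every cell (comparing each column index to the target) with a single pass that sums the target column directly, plus one post-hoc subtraction for the excluded row.
import Mathlib
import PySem

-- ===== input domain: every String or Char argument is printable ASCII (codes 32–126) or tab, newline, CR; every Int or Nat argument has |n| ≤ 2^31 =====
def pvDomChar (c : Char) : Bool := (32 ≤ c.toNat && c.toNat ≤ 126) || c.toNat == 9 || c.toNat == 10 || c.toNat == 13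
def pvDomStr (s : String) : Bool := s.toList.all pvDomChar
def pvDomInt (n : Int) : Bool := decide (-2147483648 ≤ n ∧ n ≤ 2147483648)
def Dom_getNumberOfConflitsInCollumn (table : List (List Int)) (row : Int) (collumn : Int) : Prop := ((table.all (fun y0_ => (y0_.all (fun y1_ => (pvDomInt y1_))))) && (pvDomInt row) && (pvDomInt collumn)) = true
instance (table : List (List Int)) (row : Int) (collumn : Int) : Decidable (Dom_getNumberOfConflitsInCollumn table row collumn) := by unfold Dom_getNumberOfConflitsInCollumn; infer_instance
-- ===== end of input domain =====

-- B replaces A's nested scan over every cell with a single pass summing the target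
-- column directly, plus one post-hoc subtraction for the excluded row (objective: faster).

-- ===== PORT A =====
def getNumberOfConflitsInCollumn (table : List (List Int)) (row : Int) (collumn : Int) : Int :=
  (List.range table.length).foldl (fun conflits (linha : Nat) =>
    (List.range (table.getD linha []).length).foldl (fun c (coluna : Nat) =>
      if (coluna : Int) = collumn then
        if (table.getD linha []).getD coluna 0 = 1 ∧ (linha : Int) ≠ row then c + 1 else c
      else c) conflits) 0

-- ===== PORT B =====
def getNumberOfConflitsInCollumn_alt (table : List (List Int)) (row : Int) (collumn : Int) : Int :=
  let total := table.foldl (fun total r =>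
    if 0 ≤ collumn ∧ collumn < (r.length : Int) ∧ r.getD collumn.toNat 0 = 1 then total + 1 else total) 0
  if 0 ≤ row ∧ row < (table.length : Int) ∧ 0 ≤ collumn ∧ collumn < ((table.getD row.toNat []).length : Int) ∧ (table.getD row.toNat []).getD collumn.toNat 0 = 1
  then total - 1 else total

-- ===== PRECONDITION & SPEC =====
def Spec_getNumberOfConflitsInCollumn (table : List (List Int)) (row : Int) (collumn : Int) (out : Int) : Prop := out = getNumberOfConflitsInCollumn_alt table row collumn
instance (table : List (List Int)) (row : Int) (collumn : Int) (out : Int) : Decidable (Spec_getNumberOfConflitsInCollumn table row collumn out) := by unfold Spec_getNumberOfConflitsInCollumn; infer_instance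

-- ===== CLAIM (what is proved, stated in full; the proofs are below) =====
def Claim_equal_getNumberOfConflitsInCollumn : Prop := ∀ (table : List (List Int)) (row : Int) (collumn : Int), Dom_getNumberOfConflitsInCollumn table row collumn → Spec_getNumberOfConflitsInCollumn table row collumn (getNumberOfConflitsInCollumn table row collumn)

-- ===== LEMMAS AND PROOFS =====

-- inner loop of A: at most the single index 'collumn' of the scanned row matches
theorem pv_inner (r : List Int) (collumn : Int) (P : Prop) [Decidable P] :
    ∀ (m : Nat) (a : Int),
    (List.range m).foldl (fun c (coluna : Nat) =>
      if (coluna : Int) = collumn then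
        if r.getD coluna 0 = 1 ∧ P then c + 1 else c
      else c) a
    = a + (if (0 ≤ collumn ∧ collumn < (m : Int) ∧ r.getD collumn.toNat 0 = 1) ∧ P then 1 else 0) := by
  intro m
  induction m with
  | zero =>
    intro a
    simp only [List.range_zero, List.foldl_nil, Nat.cast_zero]
    have h : ¬ ((0 ≤ collumn ∧ collumn < (0 : Int) ∧ r.getD collumn.toNat 0 = 1) ∧ P) := by
      rintro ⟨⟨h1, h2, _⟩, _⟩; omega
    rw [if_neg h]; ring
  | succ n ih =>
    intro a
    rw [List.range_succ, List.foldl_append, ih]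
    simp only [List.foldl_cons, List.foldl_nil]
    by_cases hc : (n : Int) = collumn
    · have ht : collumn.toNat = n := by omega
      rw [if_pos hc]
      have hno : ¬ ((0 ≤ collumn ∧ collumn < (n : Int) ∧ r.getD collumn.toNat 0 = 1) ∧ P) := by
        rintro ⟨⟨_, h, _⟩, _⟩; omega
      rw [if_neg hno]
      by_cases hp : r.getD n 0 = 1 ∧ P
      · have hyes : (0 ≤ collumn ∧ collumn < ((n + 1 : Nat) : Int) ∧ r.getD collumn.toNat 0 = 1) ∧ P :=
          ⟨⟨by omega, by push_cast; omega, by rw [ht]; exact hp.1⟩, hp.2⟩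
        rw [if_pos hp, if_pos hyes]; ring
      · have hno2 : ¬ ((0 ≤ collumn ∧ collumn < ((n + 1 : Nat) : Int) ∧ r.getD collumn.toNat 0 = 1) ∧ P) := by
          rintro ⟨⟨_, _, hg⟩, hP⟩; rw [ht] at hg; exact hp ⟨hg, hP⟩
        rw [if_neg hp, if_neg hno2]
    · rw [if_neg hc]
      have hiff : ((0 ≤ collumn ∧ collumn < ((n + 1 : Nat) : Int) ∧ r.getD collumn.toNat 0 = 1) ∧ P)
          ↔ ((0 ≤ collumn ∧ collumn < (n : Int) ∧ r.getD collumn.toNat 0 = 1) ∧ P) := by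
        constructor <;> rintro ⟨⟨a1, a2, a3⟩, hP⟩ <;> exact ⟨⟨a1, by omega, a3⟩, hP⟩
      rw [if_congr hiff rfl rfl]

-- outer loop of A as a sum of per-row indicators
theorem pv_outer (table : List (List Int)) (row : Int) (collumn : Int) :
    ∀ (n : Nat) (a : Int),
    (List.range n).foldl (fun conflits (linha : Nat) =>
      (List.range (table.getD linha []).length).foldl (fun c (coluna : Nat) =>
        if (coluna : Int) = collumn then
          if (table.getD linha []).getD coluna 0 = 1 ∧ (linha : Int) ≠ row then c + 1 else c
        else c) conflits) a
    = a + ((List.range n).map (fun (linha : Nat) =>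
        if (0 ≤ collumn ∧ collumn < ((table.getD linha []).length : Int)
            ∧ (table.getD linha []).getD collumn.toNat 0 = 1) ∧ (linha : Int) ≠ row
        then (1 : Int) else 0)).sum := by
  intro n
  induction n with
  | zero => intro a; simp
  | succ n ih =>
    intro a
    rw [List.range_succ, List.foldl_append, ih]
    simp only [List.foldl_cons, List.foldl_nil, List.map_append, List.sum_append,
      List.map_cons, List.map_nil, List.sum_cons, List.sum_nil]
    rw [pv_inner]
    ring

-- removing a single excluded index from a sum over range n
theorem pv_split (G : Nat → Int) (row : Int) :
    ∀ (n : Nat),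
    ((List.range n).map (fun (i : Nat) => if (i : Int) ≠ row then G i else 0)).sum
    = ((List.range n).map G).sum - (if 0 ≤ row ∧ row < (n : Int) then G row.toNat else 0) := by
  intro n
  induction n with
  | zero => simp
  | succ n ih =>
    rw [List.range_succ, List.map_append, List.sum_append, ih, List.map_append, List.sum_append]
    simp only [List.map_cons, List.map_nil, List.sum_cons, List.sum_nil, Int.add_zero]
    by_cases hc : (n : Int) = row
    · have ht : row.toNat = n := by omega
      have h1 : ¬ ((n : Int) ≠ row) := by omega
      have h2 : ¬ (0 ≤ row ∧ row < (n : Int)) := by omega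
      have h3 : 0 ≤ row ∧ row < ((n + 1 : Nat) : Int) := ⟨by omega, by omega⟩
      rw [if_neg h1, if_neg h2, if_pos h3, ht]
      ring
    · rw [if_pos hc]
      have hiff : (0 ≤ row ∧ row < ((n + 1 : Nat) : Int)) ↔ (0 ≤ row ∧ row < (n : Int)) := by
        constructor <;> rintro ⟨a1, a2⟩ <;> exact ⟨a1, by omega⟩
      rw [if_congr hiff rfl rfl]
      ring

-- a per-index sum over range equals a per-element count over the list
theorem pv_range_count (C : List Int → Prop) [DecidablePred C] :
    ∀ (l : List (List Int)),
    ((List.range l.length).map (fun (i : Nat) => if C (l.getD i []) then (1 : Int) else 0)).sum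
    = (l.countP (fun x => decide (C x)) : Int) := by
  intro l
  induction l with
  | nil => simp
  | cons x xs ih =>
    rw [List.length_cons, List.range_succ_eq_map, List.map_cons, List.map_map, List.sum_cons]
    simp only [Function.comp_def, List.getD_cons_succ, List.getD_cons_zero]
    rw [ih, List.countP_cons]
    by_cases hC : C x <;> simp [hC] <;> try omega

-- ===== VERDICT (by name: the statement is the Claim_ definition above) =====
theorem getNumberOfConflitsInCollumn_spec : Claim_equal_getNumberOfConflitsInCollumn := by
  intro table row collumn _
  show getNumberOfConflitsInCollumn table row collumn = getNumberOfConflitsInCollumn_alt table row collumn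
  unfold getNumberOfConflitsInCollumn getNumberOfConflitsInCollumn_alt
  rw [pv_outer]
  simp only [PySem.List.foldl_ite_add_one]
  have hmap : ((List.range table.length).map (fun (linha : Nat) =>
      if (0 ≤ collumn ∧ collumn < ((table.getD linha []).length : Int)
          ∧ (table.getD linha []).getD collumn.toNat 0 = 1) ∧ (linha : Int) ≠ row
      then (1 : Int) else 0))
      = ((List.range table.length).map (fun (linha : Nat) =>
      if (linha : Int) ≠ row then
        (if 0 ≤ collumn ∧ collumn < ((table.getD linha []).length : Int)
          ∧ (table.getD linha []).getD collumn.toNat 0 = 1 then (1 : Int) else 0) else 0)) := by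
    apply List.map_congr_left; intro i _; split_ifs <;> tauto
  rw [hmap, pv_split,
    pv_range_count (fun r => 0 ≤ collumn ∧ collumn < (r.length : Int) ∧ r.getD collumn.toNat 0 = 1)]
  split_ifs with h1 h2 h3 h4 h5
  · ring
  · exact absurd ⟨h1.1, h1.2, h2.1, h2.2.1, h2.2.2⟩ h3
  · exact absurd ⟨h4.2.2.1, h4.2.2.2.1, h4.2.2.2.2⟩ h2
  · ring
  · exact absurd ⟨h5.1, h5.2.1⟩ h1
  · ring
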